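-- pv_equiv track=rewrite | github.com/osaaaam/AutoraceWebService2 | lambda/function/module/scraping.py | get_position_y
-- ===== SOURCE A (Python) =====
-- def get_position_y(l_hande):
--     l_position_y = []
--     for i in range(len(l_hande)):
--         # 1号車の場合
--         if i == 0:
--             l_position_y.append(1)
--         # 2号車以降の場合
--         else:
--             if l_hande[i] == l_hande[i-1]:
--                 l_position_y.append(l_position_y[i-1])
--             else:
--                 l_position_y.append(l_position_y[i-1]+1)
--     return l_position_y
-- ===== SOURCE B (Python) =====
-- def get_position_y(l_hande):
--     # stage 1: run-length encode the list into run lengths of equal adjacent values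
--     runs = []
--     i = 0
--     n = len(l_hande)
--     while i < n:
--         j = i + 1
--         while j < n and l_hande[j] == l_hande[i]:
--             j += 1
--         runs.append(j - i)
--         i = j
--     # stage 2: run number k (1-based) is the rank of every car in that run
--     out = []
--     for rank, length in enumerate(runs, start=1):
--         out += [rank] * length
--     return out
-- ===== Notes on version B (the rewrite author's own statement) =====
-- stated objective: alternative
-- what changed: Replaces A's single stateful loop (which reads its previously appended rank back out of the output list) by run-length encoding the list into run lengths first and then replicating each run's 1-based run number to build the output.
import Mathlib
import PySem

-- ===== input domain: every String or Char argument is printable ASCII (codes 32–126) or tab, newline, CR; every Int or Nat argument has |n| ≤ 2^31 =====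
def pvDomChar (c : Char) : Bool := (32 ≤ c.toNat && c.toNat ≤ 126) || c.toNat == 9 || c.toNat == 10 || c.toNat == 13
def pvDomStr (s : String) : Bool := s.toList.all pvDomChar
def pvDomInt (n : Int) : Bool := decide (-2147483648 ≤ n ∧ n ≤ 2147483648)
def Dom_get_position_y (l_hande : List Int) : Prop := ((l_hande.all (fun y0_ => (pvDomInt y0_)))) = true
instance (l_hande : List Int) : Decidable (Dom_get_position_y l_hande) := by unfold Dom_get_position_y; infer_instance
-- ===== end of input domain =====

-- B replaces A's stateful index loop (which reads back its previously appended rank) by a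
-- run-length encoding of the list followed by replicating each run's 1-based run number
-- (objective: alternative decomposition, same O(n) cost).

-- ===== PORT A =====
-- literal transliteration of A's loop: fold over range(len), appending to the
-- accumulator and reading the previously appended group number back via l_position_y[i-1]
-- (always in range, so pyGetD's default 0 is never used)
def get_position_y (l_hande : List Int) : List Int :=
  (PySem.List.pyRange 0 l_hande.length 1).foldl
    (fun acc i =>
      if i = 0 then acc ++ [(1 : Int)]
      else if PySem.List.pyGetD l_hande i 0 = PySem.List.pyGetD l_hande (i - 1) 0 then
        acc ++ [PySem.List.pyGetD acc (i - 1) 0]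
      else
        acc ++ [PySem.List.pyGetD acc (i - 1) 0 + 1]) []

-- ===== PORT B =====
-- stage 1 of Source B: the inner 'while j < n and l_hande[j] == l_hande[i]' run scan —
-- number of leading elements of the tail equal to the run's first element
def pvCount (h : Int) : List Int → Nat
  | [] => 0
  | x :: xs => if x = h then pvCount h xs + 1 else 0

-- stage 1 of Source B: the outer while loop collecting run lengths (the index pair (i, j)
-- walking the list is transcribed as recursion on the remaining suffix)
def pvRunsAux : Nat → List Int → List Nat
  | 0, _ => []
  | _, [] => []
  | fuel + 1, x :: xs => (pvCount x xs + 1) :: pvRunsAux fuel (xs.drop (pvCount x xs))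

def pvRuns (l : List Int) : List Nat :=
  pvRunsAux l.length l

-- stage 2 of Source B: 'for rank, length in enumerate(runs, start=1): out += [rank]*length'
def pvExpand (rank : Int) : List Nat → List Int
  | [] => []
  | k :: rest => List.replicate k rank ++ pvExpand (rank + 1) rest

def get_position_y_alt (l_hande : List Int) : List Int :=
  pvExpand 1 (pvRuns l_hande)

-- ===== PRECONDITION & SPEC =====
def Spec_get_position_y (l_hande : List Int) (out : List Int) : Prop := out = get_position_y_alt l_hande
instance (l_hande : List Int) (out : List Int) : Decidable (Spec_get_position_y l_hande out) := by unfold Spec_get_position_y; infer_instance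

-- ===== CLAIM (what is proved, stated in full; the proofs are below) =====
def Claim_equal_get_position_y : Prop := ∀ (l_hande : List Int), Dom_get_position_y l_hande → Spec_get_position_y l_hande (get_position_y l_hande)

-- ===== LEMMAS AND PROOFS =====

-- reference: the rank sequence as a structural recursion carrying (current rank, previous value)
def pvRef (r prev : Int) : List Int → List Int
  | [] => []
  | x :: xs => (if x = prev then r else r + 1) :: pvRef (if x = prev then r else r + 1) x xs

-- reference at a run boundary: the previous value is known to differ from the head
def pvRefS (r : Int) : List Int → List Int
  | [] => []
  | y :: ys => (r + 1) :: pvRef (r + 1) y ys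

theorem pvRef_length (xs : List Int) : ∀ r prev, (pvRef r prev xs).length = xs.length := by
  induction xs with
  | nil => intro r prev; rfl
  | cons x xs ih => intro r prev; simp [pvRef, ih]

theorem pvRefS_length (l : List Int) (r : Int) : (pvRefS r l).length = l.length := by
  cases l with
  | nil => rfl
  | cons y ys => simp [pvRefS, pvRef_length]

-- splitting the reference at the end of the current run
theorem pvRef_run (xs : List Int) : ∀ r x,
    pvRef r x xs = List.replicate (pvCount x xs) r ++ pvRefS r (xs.drop (pvCount x xs)) := by
  induction xs with
  | nil => intro r x; rfl
  | cons y ys ih =>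
    intro r x
    by_cases h : y = x
    · subst h
      simp only [pvCount, pvRef]
      simp only [if_true, List.replicate_succ, List.drop_succ_cons, List.cons_append]
      exact congrArg _ (ih r y)
    · simp [pvCount, h, pvRef, pvRefS]

-- B's expansion of the run lengths is the reference sequence
theorem pvExpand_runs : ∀ (n : Nat) (l : List Int), l.length ≤ n →
    ∀ r, pvExpand (r + 1) (pvRunsAux n l) = pvRefS r l := by
  intro n
  induction n with
  | zero =>
    intro l hl r
    have : l = [] := List.eq_nil_of_length_eq_zero (Nat.le_zero.mp hl)
    subst this; simp [pvRunsAux, pvExpand, pvRefS]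
  | succ n ih =>
    intro l hl r
    cases l with
    | nil => simp [pvRunsAux, pvExpand, pvRefS]
    | cons y ys =>
      rw [pvRunsAux]
      set c := pvCount y ys with hc
      have hdrop : (ys.drop c).length ≤ n := by
        simp only [List.length_drop]
        simp only [List.length_cons] at hl
        omega
      simp only [pvExpand, pvRefS, pvRef_run ys (r + 1) y, ← hc,
        List.replicate_succ, List.cons_append]
      exact congrArg _ (congrArg _ (ih (ys.drop c) hdrop (r + 1)))

-- head and recurrence characterisation of the reference
theorem pvRef_getD_zero (xs : List Int) (r prev : Int) (h : xs ≠ []) :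
    (pvRef r prev xs).getD 0 0 = if xs.getD 0 0 = prev then r else r + 1 := by
  cases xs with
  | nil => exact absurd rfl h
  | cons x xs => simp [pvRef]

theorem pvRef_getD_succ (xs : List Int) : ∀ (r prev : Int) (i : Nat), i + 1 < xs.length →
    (pvRef r prev xs).getD (i + 1) 0 = (pvRef r prev xs).getD i 0 +
      (if xs.getD (i + 1) 0 = xs.getD i 0 then 0 else 1) := by
  induction xs with
  | nil => intro r prev i h; simp at h
  | cons x xs ih =>
    intro r prev i h
    cases i with
    | zero =>
      have hne : xs ≠ [] := by
        simp only [List.length_cons] at h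
        exact List.ne_nil_of_length_pos (by omega)
      simp only [pvRef, List.getD_cons_succ, List.getD_cons_zero,
        pvRef_getD_zero xs _ x hne]
      split_ifs <;> ring
    | succ i =>
      simp only [pvRef, List.getD_cons_succ]
      exact ih _ x i (by simpa using h)

theorem pvRefS_getD_zero (l : List Int) (h : l ≠ []) : (pvRefS 0 l).getD 0 0 = 1 := by
  cases l with
  | nil => exact absurd rfl h
  | cons y ys => simp [pvRefS]

theorem pvRefS_getD_succ (l : List Int) (i : Nat) (h : i + 1 < l.length) :
    (pvRefS 0 l).getD (i + 1) 0 = (pvRefS 0 l).getD i 0 +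
      (if l.getD (i + 1) 0 = l.getD i 0 then 0 else 1) := by
  cases l with
  | nil => simp at h
  | cons y ys =>
    cases i with
    | zero =>
      have hne : ys ≠ [] := by
        simp only [List.length_cons] at h
        exact List.ne_nil_of_length_pos (by omega)
      simp only [pvRefS, List.getD_cons_succ, List.getD_cons_zero,
        pvRef_getD_zero ys _ y hne]
      split_ifs <;> ring
    | succ i =>
      simp only [pvRefS, List.getD_cons_succ]
      exact pvRef_getD_succ ys _ y i (by simpa using h)

-- A's fold over the first n indices
def pvAFold (l : List Int) (n : Nat) : List Int :=
  (PySem.List.pyRange 0 n 1).foldl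
    (fun acc i =>
      if i = 0 then acc ++ [(1 : Int)]
      else if PySem.List.pyGetD l i 0 = PySem.List.pyGetD l (i - 1) 0 then
        acc ++ [PySem.List.pyGetD acc (i - 1) 0]
      else
        acc ++ [PySem.List.pyGetD acc (i - 1) 0 + 1]) []

-- A's fold builds precisely the prefixes of the reference sequence
theorem pvAFold_take (l : List Int) : ∀ n, n ≤ l.length →
    pvAFold l n = (pvRefS 0 l).take n := by
  intro n
  induction n with
  | zero => intro _; rfl
  | succ n ih =>
    intro hn
    have hn' : n ≤ l.length := Nat.le_of_succ_le hn
    have hout := ih hn'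
    have hr : PySem.List.pyRange 0 (↑(n + 1)) 1 = PySem.List.pyRange 0 (↑n) 1 ++ [(n : Int)] := by
      have := PySem.List.pyRange_one_succ_right (a := 0) (b := (n : Int)) (by positivity)
      simpa [Nat.cast_add] using this
    have hA : pvAFold l (n + 1) = pvAFold l n ++
        [if (n : Int) = 0 then (1 : Int)
         else if PySem.List.pyGetD l (n : Int) 0 = PySem.List.pyGetD l ((n : Int) - 1) 0 then
           PySem.List.pyGetD (pvAFold l n) ((n : Int) - 1) 0
         else PySem.List.pyGetD (pvAFold l n) ((n : Int) - 1) 0 + 1] := by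
      simp only [pvAFold, hr, List.foldl_append, List.foldl_cons, List.foldl_nil]
      split_ifs <;> rfl
    have hlenR : (pvRefS 0 l).length = l.length := pvRefS_length l 0
    have hnR : n < (pvRefS 0 l).length := by omega
    have htake : (pvRefS 0 l).take (n + 1) = (pvRefS 0 l).take n ++ [(pvRefS 0 l).getD n 0] := by
      rw [List.take_add_one, List.getElem?_eq_getElem hnR]
      simp [List.getD, List.getElem?_eq_getElem hnR]
    have hval : (if (n : Int) = 0 then (1 : Int)
         else if PySem.List.pyGetD l (n : Int) 0 = PySem.List.pyGetD l ((n : Int) - 1) 0 then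
           PySem.List.pyGetD (pvAFold l n) ((n : Int) - 1) 0
         else PySem.List.pyGetD (pvAFold l n) ((n : Int) - 1) 0 + 1) = (pvRefS 0 l).getD n 0 := by
      rcases Nat.eq_zero_or_pos n with h0 | hpos
      · subst h0
        have hne : l ≠ [] := List.ne_nil_of_length_pos (by omega)
        simpa [List.getD] using (pvRefS_getD_zero l hne).symm
      · have hn0 : ((n : Int)) ≠ 0 := by exact_mod_cast Nat.pos_iff_ne_zero.mp hpos
        have hcast : ((n : Int) - 1) = ((n - 1 : Nat) : Int) := by
          push_cast [hpos]; ring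
        rw [if_neg hn0, hcast, hout, PySem.List.pyGetD_natCast, PySem.List.pyGetD_natCast,
          PySem.List.pyGetD_natCast]
        have hprev : ((pvRefS 0 l).take n).getD (n - 1) 0 = (pvRefS 0 l).getD (n - 1) 0 := by
          simp [List.getD, List.getElem?_take_of_lt (show n - 1 < n by omega)]
        have hrec := pvRefS_getD_succ l (n - 1) (by omega)
        rw [show n - 1 + 1 = n from by omega] at hrec
        rw [hprev, hrec]
        split_ifs <;> ring
    rw [hA, hval, hout, htake]

-- ===== VERDICT (by name: the statement is the Claim_ definition above) =====
theorem get_position_y_spec : Claim_equal_get_position_y := by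
  intro l _
  unfold Spec_get_position_y get_position_y_alt
  have hA : get_position_y l = pvRefS 0 l := by
    have h := pvAFold_take l l.length le_rfl
    rw [List.take_of_length_le (le_of_eq (pvRefS_length l 0))] at h
    exact h
  have hB : pvExpand 1 (pvRuns l) = pvRefS 0 l := by
    simpa using pvExpand_runs l.length l le_rfl 0
  rw [hA, hB]
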